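-- pv_equiv track=rewrite | github.com/relevreal/bug | bug-engine/src/bug_engine/.ipynb_checkpoints/bug_engine-checkpoint.py | get_hex_num
-- ===== SOURCE A (Python) =====
-- def get_hex_num(board_size: int) -> int:
--     if board_size < 2:
--         raise ValueError('board size has to be at least 2')
--     # start with the middle row
--     hex_num = 2 * board_size - 1
--     for row_i in range(board_size - 1):
--         row_size = board_size + row_i
--         # times 2 to account of mirror row on the other half of the board
--         hex_num += 2 * row_size
--     return hex_num
-- ===== SOURCE B (Python) =====
-- def get_hex_num(board_size: int) -> int:
--     if board_size < 2:
--         raise ValueError('board size has to be at least 2')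
--     # centered hexagonal number: closed form
--     return 3 * board_size * board_size - 3 * board_size + 1
-- ===== Notes on version B (the rewrite author's own statement) =====
-- stated objective: faster
-- what changed: Replaced the row-summing loop with the closed-form centered-hexagonal formula 3n^2-3n+1.
import Mathlib
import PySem

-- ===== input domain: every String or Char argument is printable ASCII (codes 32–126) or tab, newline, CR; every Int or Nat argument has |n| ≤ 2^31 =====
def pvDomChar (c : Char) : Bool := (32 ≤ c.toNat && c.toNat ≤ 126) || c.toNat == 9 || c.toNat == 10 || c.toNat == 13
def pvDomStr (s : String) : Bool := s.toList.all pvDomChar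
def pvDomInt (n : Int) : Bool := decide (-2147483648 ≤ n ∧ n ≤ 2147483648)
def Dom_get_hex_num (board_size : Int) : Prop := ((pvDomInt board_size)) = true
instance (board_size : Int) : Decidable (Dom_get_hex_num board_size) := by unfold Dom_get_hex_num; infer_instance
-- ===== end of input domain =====

-- B replaces A's row-summing loop with the closed-form centered-hexagonal formula 3n^2-3n+1 (O(1) vs O(n)).

-- ===== PORT A =====
-- loop 'for row_i in range(board_size - 1): hex_num += 2 * (board_size + row_i)'
def get_hex_num (board_size : Int) : Int :=
  (PySem.List.pyRange 0 (board_size - 1) 1).foldl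
    (fun hex_num row_i => hex_num + 2 * (board_size + row_i))
    (2 * board_size - 1)

-- ===== PORT B =====
def get_hex_num_alt (board_size : Int) : Int :=
  3 * board_size * board_size - 3 * board_size + 1

-- ===== PRECONDITION & SPEC =====
-- A raises ValueError for board_size < 2; those inputs are excluded.
def Pre_get_hex_num (board_size : Int) : Prop := 2 ≤ board_size
instance (board_size : Int) : Decidable (Pre_get_hex_num board_size) := by unfold Pre_get_hex_num; infer_instance
def pvWitness_get_hex_num : Int := (4)

def Spec_get_hex_num (board_size : Int) (out : Int) : Prop := out = get_hex_num_alt board_size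
instance (board_size : Int) (out : Int) : Decidable (Spec_get_hex_num board_size out) := by unfold Spec_get_hex_num; infer_instance

-- ===== CLAIM =====
def Claim_equal_get_hex_num : Prop := ∀ (board_size : Int), Dom_get_hex_num board_size → Pre_get_hex_num board_size → Spec_get_hex_num board_size (get_hex_num board_size)

-- ===== LEMMAS AND PROOFS =====
lemma hex_loop_sum (n : Int) : ∀ (k : Nat) (acc : Int),
    (PySem.List.pyRange 0 (k : Int) 1).foldl (fun a i => a + 2 * (n + i)) acc
      = acc + 2 * k * n + k * (k - 1) := by
  intro k
  induction k with
  | zero => intro acc; simp [PySem.List.pyRange_one_eq_nil]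
  | succ m ih =>
    intro acc
    have h : ((m + 1 : Nat) : Int) = (m : Int) + 1 := by push_cast; ring
    rw [h, PySem.List.pyRange_one_succ_right (by positivity), List.foldl_append, ih]
    simp
    ring

-- ===== VERDICT =====
theorem get_hex_num_spec : Claim_equal_get_hex_num := by
  intro n _ hpre
  unfold Pre_get_hex_num at hpre
  unfold Spec_get_hex_num get_hex_num get_hex_num_alt
  have hk : ((n - 1).toNat : Int) = n - 1 := Int.toNat_of_nonneg (by omega)
  have := hex_loop_sum n (n - 1).toNat (2 * n - 1)
  rw [hk] at this
  rw [this]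
  ring
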